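-- pv_equiv track=rewrite | github.com/moggan1337/Cipher | src/bootstrapping/bootstrapping.py | neural_network_depth
-- ===== SOURCE A (Python) =====
-- from typing import Optional, Tuple, Dict, Any, List
--
-- def neural_network_depth(
--
--     layer_sizes: List[int],
--     activation_degree: int = 3,
-- ) -> int:
--     """
--     Calculate depth required for neural network.
--
--     Args:
--         layer_sizes: List of layer sizes [input, hidden1, ..., output]
--         activation_degree: Polynomial degree for activations
--
--     Returns:
--         Total multiplicative depth
--     """
--     total_depth = 0
--
--     for i in range(len(layer_sizes) - 1):
--         # Linear layer: 1 multiplication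
--         total_depth += 1
--
--         # Activation: (degree - 1) multiplications
--         total_depth += activation_degree - 1
--
--     return total_depth
-- ===== SOURCE B (Python) =====
-- def neural_network_depth(layer_sizes, activation_degree=3):
--     return activation_degree * max(len(layer_sizes) - 1, 0)
-- ===== Notes on version B (the rewrite author's own statement) =====
-- stated objective: simpler
-- what changed: Replaced the per-layer accumulation loop with the closed form activation_degree * max(len(layer_sizes) - 1, 0).
import Mathlib
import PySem

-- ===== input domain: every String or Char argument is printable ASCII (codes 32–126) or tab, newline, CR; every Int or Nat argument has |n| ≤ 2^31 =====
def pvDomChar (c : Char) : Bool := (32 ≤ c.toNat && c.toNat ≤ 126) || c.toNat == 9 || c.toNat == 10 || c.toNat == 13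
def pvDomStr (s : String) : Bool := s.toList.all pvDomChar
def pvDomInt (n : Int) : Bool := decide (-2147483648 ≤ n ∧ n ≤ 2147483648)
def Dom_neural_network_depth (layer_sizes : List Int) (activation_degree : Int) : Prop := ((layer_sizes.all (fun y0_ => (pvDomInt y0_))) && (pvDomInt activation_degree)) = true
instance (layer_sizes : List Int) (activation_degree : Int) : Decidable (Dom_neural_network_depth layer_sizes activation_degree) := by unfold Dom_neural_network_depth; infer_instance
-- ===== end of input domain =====

-- B replaces A's per-layer accumulation loop with the closed form activation_degree * max(len-1, 0) (simpler).

-- ===== PORT A =====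
-- for i in range(len(layer_sizes)-1): total_depth += 1; total_depth += activation_degree - 1
def neural_network_depth (layer_sizes : List Int) (activation_degree : Int) : Int :=
  (PySem.List.pyRange 0 ((layer_sizes.length : Int) - 1) 1).foldl
    (fun total_depth _ => (total_depth + 1) + (activation_degree - 1)) 0

-- ===== PORT B =====
def neural_network_depth_alt (layer_sizes : List Int) (activation_degree : Int) : Int :=
  activation_degree * max ((layer_sizes.length : Int) - 1) 0

-- ===== PRECONDITION & SPEC =====
def Spec_neural_network_depth (layer_sizes : List Int) (activation_degree : Int) (out : Int) : Prop := out = neural_network_depth_alt layer_sizes activation_degree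
instance (layer_sizes : List Int) (activation_degree : Int) (out : Int) : Decidable (Spec_neural_network_depth layer_sizes activation_degree out) := by unfold Spec_neural_network_depth; infer_instance

-- ===== CLAIM (what is proved, stated in full; the proofs are below) =====
def Claim_equal_neural_network_depth : Prop := ∀ (layer_sizes : List Int) (activation_degree : Int), Dom_neural_network_depth layer_sizes activation_degree → Spec_neural_network_depth layer_sizes activation_degree (neural_network_depth layer_sizes activation_degree)

-- ===== LEMMAS AND PROOFS =====
theorem pv_foldl_const_add (d : Int) (l : List Int) (acc : Int) :
    l.foldl (fun t _ => (t + 1) + (d - 1)) acc = acc + l.length * d := by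
  induction l generalizing acc with
  | nil => simp
  | cons x xs ih =>
    simp only [List.foldl_cons, List.length_cons, ih]
    push_cast
    ring

-- ===== VERDICT (by name: the statement is the Claim_ definition above) =====
theorem neural_network_depth_spec : Claim_equal_neural_network_depth := by
  intro layer_sizes activation_degree _
  show _ = _
  unfold neural_network_depth neural_network_depth_alt
  rw [pv_foldl_const_add, PySem.List.length_pyRange_one]
  rcases layer_sizes with _ | ⟨x, xs⟩
  · simp
  · have h1 : ((x :: xs : List Int).length : Int) - 1 - 0 = (xs.length : Int) := by
      simp
    have h2 : max (((x :: xs : List Int).length : Int) - 1) 0 = (xs.length : Int) := by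
      simp
    rw [h1, h2, Int.toNat_natCast]
    ring
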